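-- pv_equiv track=rewrite | github.com/UrAvgCode/advent-of-code | 2023/day_14/parabolic_reflector_dish_2.py | spin_cycle
-- ===== SOURCE A (Python) =====
-- def spin_cycle(dish):
--     dish_list = [list(line) for line in dish]
--     for _ in range(4):
--         for line in dish_list:
--             last = 0
--             for i, char in enumerate(line):
--                 if char == "O":
--                     line[i] = "."
--                     line[last] = "O"
--                     last += 1
--                 elif char == "#":
--                     last = i + 1
--         dish_list = [list(line) for line in list(zip(*dish_list))[::-1]]
--     return tuple(map(tuple, dish_list))
-- ===== SOURCE B (Python) =====
-- def _roll_segment(seg):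
--     k = seg.count('O')
--     return 'O' * k + seg[k:].replace('O', '.')
--
--
-- def spin_cycle(dish):
--     rows = list(dish)
--     for _ in range(4):
--         rows = ['#'.join(_roll_segment(seg) for seg in row.split('#')) for row in rows]
--         rows = [''.join(t) for t in zip(*rows)][::-1]
--     return tuple(map(tuple, rows))
-- ===== Notes on version B (the rewrite author's own statement) =====
-- stated objective: idiomatic
-- what changed: A rolls each row with an in-place two-pointer sweep mutating the list; B splits each row on '#' and rebuilds every segment in closed form from its 'O'-count ('O'*k + rest with O replaced by '.'), then '#'.join's the segments; the four zip-rotations stay.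
import Mathlib
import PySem

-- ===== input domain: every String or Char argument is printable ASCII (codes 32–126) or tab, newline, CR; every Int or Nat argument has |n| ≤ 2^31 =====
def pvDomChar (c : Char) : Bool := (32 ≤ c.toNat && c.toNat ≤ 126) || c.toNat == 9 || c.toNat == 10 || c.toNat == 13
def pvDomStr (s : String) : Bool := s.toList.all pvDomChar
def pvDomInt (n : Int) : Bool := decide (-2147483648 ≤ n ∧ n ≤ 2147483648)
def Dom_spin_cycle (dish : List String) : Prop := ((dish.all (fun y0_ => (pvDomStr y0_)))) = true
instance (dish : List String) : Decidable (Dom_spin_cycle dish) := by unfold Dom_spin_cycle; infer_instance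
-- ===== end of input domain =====

-- B replaces A's in-place two-pointer rolling of each row by a split-on-'#' / closed-form-per-segment
-- rebuild ('O'*count + rest with O→'.'), same four zip-rotations; objective: idiomatic, not faster.
-- Rows are modelled as List Char (Python's 1-char strings ↔ Char); the final tuples of 1-char strings
-- become List String via String.singleton in both ports.

-- ===== PORT A =====
-- zip(*m) truncates every column at the shortest row; [::-1] is List.reverse; the getD default ' '
-- is never read because i < every row length. Used verbatim by both ports (the rotation line is
-- identical in both Pythons).
def pyRotate (m : List (List Char)) : List (List Char) :=
  ((List.range ((m.map List.length).min?.getD 0)).map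
    (fun i => m.map (fun row => row.getD i ' '))).reverse

-- the inner `for i, char in enumerate(line)` loop; `s` is the not-yet-visited suffix of the row.
-- Exact: Python iterates the live list, but the writes at step i only touch indices ≤ i, so the
-- values read are the original ones carried in `s`.
def rollGo : List Char → Nat → Nat → List Char → List Char
  | line, _, _, [] => line
  | line, last, i, c :: t =>
    if c = 'O' then rollGo ((line.set i '.').set last 'O') (last + 1) (i + 1) t
    else if c = '#' then rollGo line (i + 1) (i + 1) t
    else rollGo line last (i + 1) t

def rollA (l : List Char) : List Char := rollGo l 0 0 l

def spin_cycle (dish : List String) : List (List String) :=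
  let init := dish.map (fun line => line.toList)
  let final := (List.range 4).foldl (fun m _ => pyRotate (m.map rollA)) init
  final.map (fun row => row.map (fun c => String.singleton c))

-- ===== PORT B =====
-- seg[k:].replace('O', '.')
def deO (c : Char) : Char := if c = 'O' then '.' else c

def segRoll (s : List Char) : List Char :=
  List.replicate (s.count 'O') 'O' ++ (s.drop (s.count 'O')).map deO

-- exact port of str.split('#') (keeps empty segments; '' ↦ [''])
def pySplit : List Char → List (List Char)
  | [] => [[]]
  | c :: t =>
    if c = '#' then [] :: pySplit t
    else
      match pySplit t with
      | [] => [[c]]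
      | s :: r => (c :: s) :: r

-- exact port of '#'.join
def joinHash : List (List Char) → List Char
  | [] => []
  | [x] => x
  | x :: y :: xs => x ++ '#' :: joinHash (y :: xs)

def rollB (l : List Char) : List Char := joinHash ((pySplit l).map segRoll)

def spin_cycle_alt (dish : List String) : List (List String) :=
  let init := dish.map (fun line => line.toList)
  let final := (List.range 4).foldl (fun m _ => pyRotate (m.map rollB)) init
  final.map (fun row => row.map (fun c => String.singleton c))

-- ===== PRECONDITION & SPEC =====
def Spec_spin_cycle (dish : List String) (out : List (List String)) : Prop := out = spin_cycle_alt dish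
instance (dish : List String) (out : List (List String)) : Decidable (Spec_spin_cycle dish out) := by unfold Spec_spin_cycle; infer_instance

-- ===== CLAIM (what is proved, stated in full; the proofs are below) =====
def Claim_equal_spin_cycle : Prop := ∀ (dish : List String), Dom_spin_cycle dish → Spec_spin_cycle dish (spin_cycle dish)

-- ===== LEMMAS AND PROOFS =====

-- pure recursive description of A's in-place rolling loop: k O's already rolled to the front of
-- the current segment, `mid` the already-visited remainder of that segment (O's turned into '.').
def go2 : Nat → List Char → List Char → List Char
  | k, mid, [] => List.replicate k 'O' ++ mid
  | k, mid, c :: t =>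
    if c = 'O' then go2 (k + 1) ((mid ++ ['.']).drop 1) t
    else if c = '#' then List.replicate k 'O' ++ mid ++ '#' :: go2 0 [] t
    else go2 k (mid ++ [c]) t

theorem set_append_add {α : Type} (xs ys : List α) (n : Nat) (a : α) :
    (xs ++ ys).set (xs.length + n) a = xs ++ ys.set n a := by
  induction xs with
  | nil => simp
  | cons x xs ih => simp [Nat.succ_add, ih]

theorem go_eq : ∀ (s pre mid : List Char) (k : Nat),
    rollGo (pre ++ (List.replicate k 'O' ++ (mid ++ s))) (pre.length + k)
      (pre.length + k + mid.length) s = pre ++ go2 k mid s := by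
  intro s
  induction s with
  | nil => intro pre mid k; simp [rollGo, go2]
  | cons c t ih =>
    intro pre mid k
    by_cases hO : c = 'O'
    · subst hO
      -- the two list writes
      have hset1 : (pre ++ (List.replicate k 'O' ++ (mid ++ 'O' :: t))).set
            (pre.length + k + mid.length) '.'
          = pre ++ (List.replicate k 'O' ++ (mid ++ '.' :: t)) := by
        rw [show pre ++ (List.replicate k 'O' ++ (mid ++ 'O' :: t))
              = (pre ++ List.replicate k 'O' ++ mid) ++ 'O' :: t by simp,
            show pre.length + k + mid.length = (pre ++ List.replicate k 'O' ++ mid).length + 0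
              by simp; omega,
            set_append_add]
        simp
      have hset2 : (pre ++ (List.replicate k 'O' ++ (mid ++ '.' :: t))).set
            (pre.length + k) 'O'
          = pre ++ (List.replicate (k + 1) 'O' ++ (((mid ++ ['.']).drop 1) ++ t)) := by
        rw [show pre ++ (List.replicate k 'O' ++ (mid ++ '.' :: t))
              = (pre ++ List.replicate k 'O') ++ (mid ++ '.' :: t) by simp,
            show pre.length + k = (pre ++ List.replicate k 'O').length + 0 by simp,
            set_append_add]
        cases mid with
        | nil => simp [List.replicate_succ']
        | cons m0 m' => simp [List.replicate_succ']
      rw [show rollGo (pre ++ (List.replicate k 'O' ++ (mid ++ 'O' :: t)))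
            (pre.length + k) (pre.length + k + mid.length) ('O' :: t)
          = rollGo (((pre ++ (List.replicate k 'O' ++ (mid ++ 'O' :: t))).set
              (pre.length + k + mid.length) '.').set (pre.length + k) 'O')
              (pre.length + k + 1) (pre.length + k + mid.length + 1) t from by simp [rollGo],
          hset1, hset2]
      have := ih pre ((mid ++ ['.']).drop 1) (k + 1)
      rw [show pre.length + (k + 1) + ((mid ++ ['.']).drop 1).length
            = pre.length + k + mid.length + 1 from by simp; omega,
          show pre.length + (k + 1) = pre.length + k + 1 from by omega] at this
      rw [this, show go2 k mid ('O' :: t) = go2 (k + 1) ((mid ++ ['.']).drop 1) t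
            from by simp [go2]]
    · by_cases hH : c = '#'
      · subst hH
        rw [show rollGo (pre ++ (List.replicate k 'O' ++ (mid ++ '#' :: t)))
              (pre.length + k) (pre.length + k + mid.length) ('#' :: t)
            = rollGo (pre ++ (List.replicate k 'O' ++ (mid ++ '#' :: t)))
              (pre.length + k + mid.length + 1) (pre.length + k + mid.length + 1) t
              from by simp [rollGo]]
        have := ih (pre ++ List.replicate k 'O' ++ mid ++ ['#']) [] 0
        simp only [List.length_append, List.length_replicate, List.length_cons,
          List.length_nil, List.append_assoc, List.nil_append,
          List.replicate_zero, List.singleton_append, Nat.add_zero] at this ⊢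
        rw [show pre.length + (k + (mid.length + (0 + 1))) = pre.length + k + mid.length + 1
              from by omega] at this
        rw [this, show go2 k mid ('#' :: t) = List.replicate k 'O' ++ mid ++ '#' :: go2 0 [] t
              from by simp [go2]]
        simp
      · rw [show rollGo (pre ++ (List.replicate k 'O' ++ (mid ++ c :: t)))
              (pre.length + k) (pre.length + k + mid.length) (c :: t)
            = rollGo (pre ++ (List.replicate k 'O' ++ (mid ++ c :: t)))
              (pre.length + k) (pre.length + k + mid.length + 1) t
              from by simp [rollGo, hO, hH]]
        have := ih pre (mid ++ [c]) k
        simp only [List.length_append, List.length_cons, List.length_nil,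
          List.append_assoc, List.singleton_append] at this ⊢
        rw [show pre.length + k + (mid.length + (0 + 1)) = pre.length + k + mid.length + 1
              from by omega] at this
        rw [this, show go2 k mid (c :: t) = go2 k (mid ++ [c]) t from by simp [go2, hO, hH]]

theorem go2_free : ∀ (s : List Char), '#' ∉ s → ∀ (r : List Char) (k : Nat) (mid : List Char),
    go2 k mid (s ++ r) = go2 (k + s.count 'O') ((mid ++ s.map deO).drop (s.count 'O')) r := by
  intro s
  induction s with
  | nil => intro _ r k mid; simp
  | cons c t ih =>
    intro h r k mid
    simp only [List.mem_cons, not_or] at h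
    by_cases hO : c = 'O'
    · subst hO
      rw [List.cons_append, show go2 k mid ('O' :: (t ++ r))
            = go2 (k + 1) ((mid ++ ['.']).drop 1) (t ++ r) from by simp [go2], ih h.2]
      have h1 : List.count 'O' ('O' :: t) = t.count 'O' + 1 := by
        simp
      have h2 : List.map deO ('O' :: t) = '.' :: List.map deO t := by simp [deO]
      rw [h1, h2]
      have hmid : ((mid ++ ['.']).drop 1 ++ List.map deO t).drop (t.count 'O')
          = (mid ++ '.' :: List.map deO t).drop (t.count 'O' + 1) := by
        rw [show (mid ++ '.' :: List.map deO t) = (mid ++ ['.']) ++ List.map deO t by simp,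
          ← List.drop_append_of_le_length (by simp), List.drop_drop, Nat.add_comm]
      rw [hmid]
      congr 1
      omega
    · have hH : ¬ c = '#' := fun hc => h.1 hc.symm
      rw [List.cons_append, show go2 k mid (c :: (t ++ r))
            = go2 k (mid ++ [c]) (t ++ r) from by simp [go2, hO, hH], ih h.2]
      have h1 : List.count 'O' (c :: t) = t.count 'O' := by
        simp [hO]
      have h2 : List.map deO (c :: t) = c :: List.map deO t := by simp [deO, hO]
      rw [h1, h2]
      congr 1
      simp

theorem pySplit_ne_nil (l : List Char) : pySplit l ≠ [] := by
  cases l with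
  | nil => simp [pySplit]
  | cons c t =>
    simp only [pySplit]
    split
    · simp
    · split <;> simp

theorem pySplit_no_hash (s : List Char) (h : '#' ∉ s) : pySplit s = [s] := by
  induction s with
  | nil => rfl
  | cons c t ih =>
    simp only [List.mem_cons, not_or] at h
    simp only [pySplit]
    rw [if_neg (fun hc => h.1 hc.symm), ih h.2]

theorem pySplit_append (s t : List Char) (h : '#' ∉ s) :
    pySplit (s ++ '#' :: t) = s :: pySplit t := by
  induction s with
  | nil => simp [pySplit]
  | cons c s' ih =>
    simp only [List.mem_cons, not_or] at h
    simp only [List.cons_append, pySplit]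
    rw [if_neg (fun hc => h.1 hc.symm), ih h.2]

theorem joinHash_cons (x : List Char) (ys : List (List Char)) (h : ys ≠ []) :
    joinHash (x :: ys) = x ++ '#' :: joinHash ys := by
  cases ys with
  | nil => exact absurd rfl h
  | cons y zs => rfl

theorem go2_eq_rollB (l : List Char) : go2 0 [] l = rollB l := by
  have hsplit := List.takeWhile_append_dropWhile (p := fun c => !(c == '#')) (l := l)
  have hfree : '#' ∉ l.takeWhile (fun c => !(c == '#')) := by
    intro hm
    have := List.mem_takeWhile_imp hm
    simp at this
  cases hd : l.dropWhile (fun c => !(c == '#')) with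
  | nil =>
    have hl : l = l.takeWhile (fun c => !(c == '#')) := by
      conv_lhs => rw [← hsplit]
      rw [hd, List.append_nil]
    conv_lhs => rw [hl, show l.takeWhile (fun c => !(c == '#'))
        = l.takeWhile (fun c => !(c == '#')) ++ [] from by simp]
    rw [go2_free _ hfree]
    conv_rhs => rw [hl]
    simp only [go2, List.nil_append]
    rw [rollB, pySplit_no_hash _ hfree]
    simp [segRoll, joinHash, List.map_drop]
  | cons c t =>
    have hc : c = '#' := by
      have h2 := List.head_dropWhile_not (p := fun c => !(c == '#')) (l := l)
        (by rw [hd]; simp)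
      simp only [hd, List.head_cons] at h2
      simpa using h2
    subst hc
    have hl : l = l.takeWhile (fun c => !(c == '#')) ++ '#' :: t := by
      conv_lhs => rw [← hsplit]
      rw [hd]
    have iht : go2 0 [] t = rollB t := go2_eq_rollB t
    conv_lhs => rw [hl]
    conv_rhs => rw [hl]
    rw [go2_free _ hfree,
      show ∀ k mid, go2 k mid ('#' :: t) = List.replicate k 'O' ++ mid ++ '#' :: go2 0 [] t
        from fun k mid => by simp [go2],
      iht,
      show rollB (l.takeWhile (fun c => !(c == '#')) ++ '#' :: t)
          = joinHash (((l.takeWhile (fun c => !(c == '#'))) :: pySplit t).map segRoll)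
        from by rw [rollB, pySplit_append _ t hfree],
      List.map_cons, joinHash_cons _ _ (by simp [pySplit_ne_nil])]
    simp [segRoll, rollB, List.map_drop]
termination_by l.length
decreasing_by
  rw [hl]
  simp
  omega


theorem roll_eq (l : List Char) : rollA l = rollB l := by
  have h := go_eq l [] [] 0
  simp at h
  rw [rollA, h, go2_eq_rollB]


-- ===== VERDICT (by name: the statement is the Claim_ definition above) =====
theorem spin_cycle_spec : Claim_equal_spin_cycle := by
  intro dish _
  unfold Spec_spin_cycle spin_cycle spin_cycle_alt
  have h : rollA = rollB := funext roll_eq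
  rw [h]
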